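-- pv_equiv track=rewrite | github.com/1noname0110-coder/News_0110_tg-bot-2.0 | app/services/digest_service.py | _extract_logical_blocks
-- ===== SOURCE A (Python) =====
-- def _extract_logical_blocks(body: str) -> list[str]:
--     blocks: list[str] = []
--     for section in body.split("\n\n"):
--         section = section.strip()
--         if not section:
--             continue
--
--         lines = [line.strip() for line in section.split("\n") if line.strip()]
--         if len(lines) <= 1:
--             blocks.append(section)
--             continue
--
--         blocks.extend(lines)
--     return blocks or [body]
-- ===== SOURCE B (Python) =====
-- def _extract_logical_blocks(body: str) -> list[str]:
--     blocks = [line.strip() for line in body.split("\n") if line.strip()]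
--     return blocks or [body]
-- ===== Notes on version B (the rewrite author's own statement) =====
-- stated objective: simpler
-- what changed: B replaces A's nested two-level split (outer split on "\n\n", per-section strip, inner line split with a length<=1 branch) by a single flat split on "\n" with a strip-and-filter comprehension and the same 'or [body]' fallback.
import Mathlib
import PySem

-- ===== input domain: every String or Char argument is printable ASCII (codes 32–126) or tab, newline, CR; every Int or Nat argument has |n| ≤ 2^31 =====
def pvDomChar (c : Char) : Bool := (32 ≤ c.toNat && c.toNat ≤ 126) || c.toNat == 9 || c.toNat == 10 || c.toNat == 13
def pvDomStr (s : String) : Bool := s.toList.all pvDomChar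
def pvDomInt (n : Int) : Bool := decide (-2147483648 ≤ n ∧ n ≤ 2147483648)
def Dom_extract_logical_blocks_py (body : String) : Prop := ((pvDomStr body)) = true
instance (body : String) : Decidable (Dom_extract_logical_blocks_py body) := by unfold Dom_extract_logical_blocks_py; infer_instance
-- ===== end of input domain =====

-- B flattens A's nested split (outer split on "\n\n", per-section strip and inner line split
-- with a length<=1 branch) into a single split on "\n" with one strip-and-filter pass
-- (objective: simpler).

-- ===== PORT A =====
-- body.split("\n\n") / section.split("\n"): the separators are non-empty literals, so
-- PySem.Str.split? is always `some`; `.getD []` only unwraps it.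
def extract_logical_blocks_py (body : String) : List String :=
  let blocks :=
    ((PySem.Str.split? body "\n\n").getD []).foldl (fun blocks sec =>
      let s := PySem.Str.strip sec
      if s = "" then blocks
      else
        let lines := ((PySem.Str.split? s "\n").getD []).filterMap (fun line =>
          if PySem.Str.strip line = "" then none else some (PySem.Str.strip line))
        if lines.length ≤ 1 then blocks ++ [s] else blocks ++ lines) []
  if blocks = [] then [body] else blocks

-- ===== PORT B =====
def extract_logical_blocks_py_alt(body : String) : List String :=
  let blocks := ((PySem.Str.split? body "\n").getD []).filterMap (fun line =>
    if PySem.Str.strip line = "" then none else some (PySem.Str.strip line))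
  if blocks = [] then [body] else blocks

-- ===== PRECONDITION & SPEC =====
def Spec_extract_logical_blocks_py (body : String) (out : List String) : Prop := out = extract_logical_blocks_py_alt body
instance (body : String) (out : List String) : Decidable (Spec_extract_logical_blocks_py body out) := by unfold Spec_extract_logical_blocks_py; infer_instance

-- ===== CLAIM (what is proved, stated in full; the proofs are below) =====
def Claim_equal_extract_logical_blocks_py : Prop := ∀ (body : String), Dom_extract_logical_blocks_py body → Spec_extract_logical_blocks_py body (extract_logical_blocks_py body)

-- ===== LEMMAS AND PROOFS =====

def pvConsHead (c : Char) : List (List Char) → List (List Char)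
  | [] => [[c]]
  | h :: t => (c :: h) :: t

def pvSplit (sep : List Char) : List Char → List (List Char)
  | [] => [[]]
  | c :: rest =>
    if sep.isPrefixOf (c :: rest) then
      [] :: pvSplit sep (rest.drop (sep.length - 1))
    else
      pvConsHead c (pvSplit sep rest)
termination_by l => l.length
decreasing_by
  · simpa using Nat.lt_succ_of_le (List.length_drop_le _ _)
  · simp

def pvPrepend (x : List Char) : List (List Char) → List (List Char)
  | [] => [x]
  | h :: t => (x ++ h) :: t

theorem pvSplit_ne_nil (sep s) : pvSplit sep s ≠ [] := by
  cases s with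
  | nil => simp [pvSplit]
  | cons c rest =>
    rw [pvSplit]
    split
    · simp
    · cases pvSplit sep rest <;> simp [pvConsHead]

theorem pvPrepend_nil (M : List (List Char)) (hM : M ≠ []) : pvPrepend [] M = M := by
  cases M <;> simp_all [pvPrepend]

theorem pvPrepend_consHead (x : List Char) (c : Char) (M : List (List Char)) :
    pvPrepend x (pvConsHead c M) = pvPrepend (x ++ [c]) M := by
  cases M <;> simp [pvPrepend, pvConsHead]

theorem pvGo_eq (sep : List Char) (hsep : sep ≠ []) :
    ∀ (fuel : Nat) (l cur : List Char) (acc : List (List Char)), l.length ≤ fuel →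
      PySem.Chars.splitOn.go sep fuel l cur acc = acc.reverse ++ pvPrepend cur.reverse (pvSplit sep l) := by
  intro fuel
  induction fuel with
  | zero =>
    intro l cur acc hl
    have : l = [] := by cases l <;> simp_all
    subst this
    simp [PySem.Chars.splitOn.go, pvSplit, pvPrepend]
  | succ n ih =>
    intro l cur acc hl
    cases l with
    | nil => simp [PySem.Chars.splitOn.go, pvSplit, pvPrepend]
    | cons c rest =>
      rw [PySem.Chars.splitOn.go]
      by_cases hp : sep.isPrefixOf (c :: rest)
      · rw [if_pos hp]
        simp only [List.length_cons] at hl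
        have hlen : (List.drop sep.length (c :: rest)).length ≤ n := by
          simp only [List.length_drop, List.length_cons]
          have : 1 ≤ sep.length := by cases sep <;> simp_all
          omega
        rw [ih _ _ _ hlen]
        have hdrop : List.drop sep.length (c :: rest) = rest.drop (sep.length - 1) := by
          cases sep with
          | nil => exact absurd rfl hsep
          | cons a as => simp
        rw [pvSplit, if_pos hp, hdrop, List.reverse_nil]
        rw [pvPrepend_nil _ (pvSplit_ne_nil _ _)]
        simp [pvPrepend]
      · rw [if_neg hp]
        rw [ih _ _ _ (by simpa using Nat.le_of_succ_le_succ (by simpa using hl))]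
        rw [pvSplit, if_neg hp, pvPrepend_consHead]
        simp [pvPrepend]

theorem pvSplitOn_eq (s sep : List Char) (hsep : sep ≠ []) :
    PySem.Chars.splitOn s sep = pvSplit sep s := by
  rw [PySem.Chars.splitOn, pvGo_eq sep hsep _ _ _ _ (Nat.le_succ _)]
  simp [pvPrepend_nil _ (pvSplit_ne_nil _ _)]

def pvG (l : List Char) : Option (List Char) :=
  if PySem.Chars.strip l = [] then none else some (PySem.Chars.strip l)

def pvF (s : List Char) : List (List Char) := (pvSplit ['\n'] s).filterMap pvG

def pvJoin (sep : List Char) : List (List Char) → List Char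
  | [] => []
  | [x] => x
  | x :: y :: t => x ++ sep ++ pvJoin sep (y :: t)

theorem pvJoin_consHead (sep : List Char) (c : Char) (M : List (List Char)) (hM : M ≠ []) :
    pvJoin sep (pvConsHead c M) = c :: pvJoin sep M := by
  match M with
  | [] => exact absurd rfl hM
  | [h] => simp [pvConsHead, pvJoin]
  | h :: h2 :: t => simp [pvConsHead, pvJoin]

theorem pvJoin_pvSplit (sep : List Char) (hsep : sep ≠ []) (s : List Char) :
    pvJoin sep (pvSplit sep s) = s := by
  induction s using pvSplit.induct sep with
  | case1 => simp [pvSplit, pvJoin]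
  | case2 c rest hp ih =>
    rw [pvSplit, if_pos hp]
    obtain ⟨h, t, hht⟩ : ∃ h t, pvSplit sep (rest.drop (sep.length - 1)) = h :: t := by
      cases hMm : pvSplit sep (rest.drop (sep.length - 1)) with
      | nil => exact absurd hMm (pvSplit_ne_nil _ _)
      | cons h t => exact ⟨h, t, rfl⟩
    rw [hht]
    show [] ++ sep ++ pvJoin sep (h :: t) = c :: rest
    rw [← hht, ih]
    obtain ⟨tl, htl⟩ := List.isPrefixOf_iff_prefix.mp hp
    have hdrop : List.drop sep.length (c :: rest) = rest.drop (sep.length - 1) := by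
      cases sep with
      | nil => exact absurd rfl hsep
      | cons a as => simp
    rw [← hdrop, ← htl, List.drop_left]
    simp
  | case3 c rest hp ih =>
    rw [pvSplit, if_neg hp, pvJoin_consHead sep c _ (pvSplit_ne_nil _ _), ih]

theorem pvConsHead_append (c : Char) (M M' : List (List Char)) (hM : M ≠ []) :
    pvConsHead c (M ++ M') = pvConsHead c M ++ M' := by
  cases M with
  | nil => exact absurd rfl hM
  | cons h t => simp [pvConsHead]

theorem pvSplit1_cons_nl (q : List Char) : pvSplit ['\n'] ('\n' :: q) = [] :: pvSplit ['\n'] q := by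
  rw [pvSplit]
  simp [List.isPrefixOf]

theorem pvSplit1_cons (c : Char) (q : List Char) (hc : c ≠ '\n') :
    pvSplit ['\n'] (c :: q) = pvConsHead c (pvSplit ['\n'] q) := by
  rw [pvSplit, if_neg]
  simp [List.isPrefixOf]
  exact fun h => absurd h.symm hc

theorem pvSplit1_append (p q : List Char) :
    pvSplit ['\n'] (p ++ '\n' :: q) = pvSplit ['\n'] p ++ pvSplit ['\n'] q := by
  induction p with
  | nil => simpa [pvSplit] using pvSplit1_cons_nl q
  | cons c p' ih =>
    by_cases hc : c = '\n'
    · subst hc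
      rw [List.cons_append, pvSplit1_cons_nl, pvSplit1_cons_nl, ih]
      simp
    · rw [List.cons_append, pvSplit1_cons c _ hc, pvSplit1_cons c _ hc, ih,
        pvConsHead_append c _ _ (pvSplit_ne_nil _ _)]

theorem pvF_append (p q : List Char) : pvF (p ++ '\n' :: q) = pvF p ++ pvF q := by
  rw [pvF, pvSplit1_append, List.filterMap_append]; rfl

theorem pvF_nil : pvF [] = [] := by
  rw [pvF, pvSplit]
  simp [pvG, PySem.Chars.strip, PySem.Chars.lstrip, PySem.Chars.rstrip]

theorem pvF_cons_nl (q : List Char) : pvF ('\n' :: q) = pvF q := by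
  have := pvF_append [] q
  simpa [pvF_nil] using this

theorem pvRstrip_eq_nil_iff (l : List Char) :
    PySem.Chars.rstrip l = [] ↔ l.all PySem.Chars.isspace = true := by
  simp [PySem.Chars.rstrip, List.dropWhile_eq_nil_iff, List.all_eq_true, List.mem_reverse]

theorem pvStrip_eq_nil_iff (l : List Char) :
    PySem.Chars.strip l = [] ↔ l.all PySem.Chars.isspace = true := by
  rw [PySem.Chars.strip, pvRstrip_eq_nil_iff]
  simp only [PySem.Chars.lstrip, List.all_eq_true]
  constructor
  · intro h x hx
    have hx' : x ∈ List.takeWhile PySem.Chars.isspace l ++ List.dropWhile PySem.Chars.isspace l := by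
      rw [List.takeWhile_append_dropWhile]; exact hx
    rcases List.mem_append.mp hx' with h1 | h1
    · exact List.mem_takeWhile_imp h1
    · exact h x h1
  · intro h x hx
    exact h x ((List.dropWhile_suffix _).subset hx)

theorem pvG_eq_none_iff (l : List Char) : pvG l = none ↔ l.all PySem.Chars.isspace = true := by
  rw [pvG]
  by_cases hs : PySem.Chars.strip l = []
  · simp [hs, (pvStrip_eq_nil_iff l).mp hs]
  · have hna : ¬ l.all PySem.Chars.isspace = true := fun h => hs ((pvStrip_eq_nil_iff l).mpr h)
    simp [hs, hna]

theorem pvJoin1_all (L : List (List Char)) :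
    (pvJoin ['\n'] L).all PySem.Chars.isspace = true ↔ ∀ l ∈ L, l.all PySem.Chars.isspace = true := by
  match L with
  | [] => simp [pvJoin]
  | [x] => simp [pvJoin]
  | x :: y :: t =>
    rw [pvJoin]
    rw [show x ++ ['\n'] ++ pvJoin ['\n'] (y :: t) = x ++ '\n' :: pvJoin ['\n'] (y :: t) by simp]
    rw [List.all_append, List.all_cons]
    simp only [Bool.and_eq_true, pvJoin1_all (y :: t)]
    constructor
    · rintro ⟨hx, _, hrest⟩ l hl
      rcases List.mem_cons.mp hl with rfl | hl
      · exact hx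
      · exact hrest l hl
    · intro h
      exact ⟨h x (by simp), ⟨by decide, fun l hl => h l (List.mem_cons_of_mem _ hl)⟩⟩

theorem pvF_eq_nil_iff (s : List Char) : pvF s = [] ↔ s.all PySem.Chars.isspace = true := by
  rw [pvF, List.filterMap_eq_nil_iff]
  conv_rhs => rw [← pvJoin_pvSplit ['\n'] (by simp) s]
  rw [pvJoin1_all]
  constructor
  · intro h l hl; exact (pvG_eq_none_iff l).mp (h l hl)
  · intro h l hl; exact (pvG_eq_none_iff l).mpr (h l hl)

theorem pvF_join2 (L : List (List Char)) :
    pvF (pvJoin ['\n', '\n'] L) = L.flatMap pvF := by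
  match L with
  | [] => simp [pvJoin, pvF_nil]
  | [x] => simp [pvJoin]
  | x :: y :: t =>
    have ih := pvF_join2 (y :: t)
    rw [pvJoin]
    rw [show x ++ ['\n', '\n'] ++ pvJoin ['\n', '\n'] (y :: t)
        = x ++ '\n' :: ('\n' :: pvJoin ['\n', '\n'] (y :: t)) by simp]
    rw [pvF_append, pvF_cons_nl, ih]
    simp

theorem pvF_flat (s : List Char) : pvF s = (pvSplit ['\n', '\n'] s).flatMap pvF := by
  conv_lhs => rw [← pvJoin_pvSplit ['\n', '\n'] (by simp) s]
  exact pvF_join2 _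

theorem pvStrip_cons_space (c : Char) (l : List Char) (hc : PySem.Chars.isspace c = true) :
    PySem.Chars.strip (c :: l) = PySem.Chars.strip l := by
  simp [PySem.Chars.strip, PySem.Chars.lstrip, List.dropWhile_cons_of_pos hc]

theorem pvRstrip_snoc_space (c : Char) (l : List Char) (hc : PySem.Chars.isspace c = true) :
    PySem.Chars.rstrip (l ++ [c]) = PySem.Chars.rstrip l := by
  simp [PySem.Chars.rstrip, List.dropWhile_cons_of_pos hc]

theorem pvStrip_snoc_space (c : Char) (l : List Char) (hc : PySem.Chars.isspace c = true) :
    PySem.Chars.strip (l ++ [c]) = PySem.Chars.strip l := by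
  rw [PySem.Chars.strip, PySem.Chars.strip, PySem.Chars.lstrip, PySem.Chars.lstrip,
    List.dropWhile_append]
  by_cases h : (List.dropWhile PySem.Chars.isspace l).isEmpty
  · rw [if_pos h]
    have h' : List.dropWhile PySem.Chars.isspace l = [] := by simpa [List.isEmpty_iff] using h
    rw [h', List.dropWhile_cons_of_pos hc]
    simp
  · rw [if_neg h, pvRstrip_snoc_space c _ hc]

-- pvF ignores a leading whitespace character
theorem pvF_cons_space (c : Char) (s : List Char) (hc : PySem.Chars.isspace c = true) :
    pvF (c :: s) = pvF s := by
  by_cases hnl : c = '\n'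
  · subst hnl; exact pvF_cons_nl s
  · rw [pvF, pvSplit1_cons c s hnl]
    obtain ⟨h, t, hht⟩ : ∃ h t, pvSplit ['\n'] s = h :: t := by
      cases hm : pvSplit ['\n'] s with
      | nil => exact absurd hm (pvSplit_ne_nil _ _)
      | cons h t => exact ⟨h, t, rfl⟩
    rw [hht, pvConsHead, pvF, hht]
    simp only [List.filterMap_cons]
    rw [show pvG (c :: h) = pvG h by rw [pvG, pvG, pvStrip_cons_space c h hc]]

def pvMapLast (f : List Char → List Char) : List (List Char) → List (List Char)
  | [] => []
  | x :: t => if t = [] then [f x] else x :: pvMapLast f t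

theorem pvMapLast_cons (f : List Char → List Char) (x : List Char) (M : List (List Char)) (hM : M ≠ []) :
    pvMapLast f (x :: M) = x :: pvMapLast f M := by
  rw [pvMapLast, if_neg hM]

theorem pvSplit1_snoc (c : Char) (s : List Char) (hnl : c ≠ '\n') :
    pvSplit ['\n'] (s ++ [c]) = pvMapLast (· ++ [c]) (pvSplit ['\n'] s) := by
  induction s with
  | nil =>
    rw [List.nil_append, pvSplit1_cons c [] hnl,
      show pvSplit ['\n'] ([] : List Char) = [[]] by rw [pvSplit]]
    simp [pvConsHead, pvMapLast]
  | cons x s' ih =>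
    by_cases hx : x = '\n'
    · subst hx
      rw [List.cons_append, pvSplit1_cons_nl, pvSplit1_cons_nl, ih,
        pvMapLast_cons _ _ _ (pvSplit_ne_nil _ _)]
    · rw [List.cons_append, pvSplit1_cons x _ hx, pvSplit1_cons x _ hx, ih]
      obtain ⟨h, t, hht⟩ : ∃ h t, pvSplit ['\n'] s' = h :: t := by
        cases hm : pvSplit ['\n'] s' with
        | nil => exact absurd hm (pvSplit_ne_nil _ _)
        | cons h t => exact ⟨h, t, rfl⟩
      rw [hht]
      cases t with
      | nil => simp [pvMapLast, pvConsHead]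
      | cons y t' =>
        rw [pvMapLast_cons (· ++ [c]) h (y :: t') (by simp), pvConsHead, pvConsHead,
          pvMapLast_cons (· ++ [c]) (x :: h) (y :: t') (by simp)]

theorem pvFilterMap_mapLast (f : List Char → List Char) (M : List (List Char))
    (hf : ∀ l, pvG (f l) = pvG l) :
    List.filterMap pvG (pvMapLast f M) = List.filterMap pvG M := by
  match M with
  | [] => rfl
  | [x] => simp [pvMapLast, List.filterMap_cons, hf x]

  | x :: y :: t =>
    have ih := pvFilterMap_mapLast f (y :: t) hf
    rw [pvMapLast_cons f x (y :: t) (by simp), List.filterMap_cons, List.filterMap_cons, ih]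

theorem pvF_snoc_space (c : Char) (s : List Char) (hc : PySem.Chars.isspace c = true) :
    pvF (s ++ [c]) = pvF s := by
  by_cases hnl : c = '\n'
  · subst hnl
    rw [show s ++ ['\n'] = s ++ '\n' :: [] by rfl, pvF_append, pvF_nil, List.append_nil]
  · rw [pvF, pvSplit1_snoc c s hnl,
      pvFilterMap_mapLast _ _ (fun l => by rw [pvG, pvG, pvStrip_snoc_space c l hc])]
    rfl

theorem pvF_ws_prefix (l s : List Char) (hl : ∀ x ∈ l, PySem.Chars.isspace x = true) :
    pvF (l ++ s) = pvF s := by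
  induction l with
  | nil => rfl
  | cons c l' ih =>
    rw [List.cons_append, pvF_cons_space c _ (hl c (by simp)), ih (fun x hx => hl x (by simp [hx]))]

theorem pvF_ws_suffix (l : List Char) (hl : ∀ x ∈ l, PySem.Chars.isspace x = true) :
    ∀ s, pvF (s ++ l) = pvF s := by
  induction l with
  | nil => simp
  | cons c l' ih =>
    intro s
    rw [show s ++ c :: l' = (s ++ [c]) ++ l' by simp]
    rw [ih (fun x hx => hl x (by simp [hx])) (s ++ [c]), pvF_snoc_space c s (hl c (by simp))]

theorem pvF_strip (p : List Char) : pvF (PySem.Chars.strip p) = pvF p := by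
  conv_rhs => rw [← List.takeWhile_append_dropWhile (p := PySem.Chars.isspace) (l := p)]
  rw [pvF_ws_prefix _ _ (fun x hx => List.mem_takeWhile_imp hx)]
  have hdec : List.dropWhile PySem.Chars.isspace p
      = PySem.Chars.rstrip (List.dropWhile PySem.Chars.isspace p)
        ++ (List.takeWhile PySem.Chars.isspace (List.dropWhile PySem.Chars.isspace p).reverse).reverse := by
    conv_lhs => rw [← List.reverse_reverse (List.dropWhile PySem.Chars.isspace p),
      ← List.takeWhile_append_dropWhile (p := PySem.Chars.isspace)
        (l := (List.dropWhile PySem.Chars.isspace p).reverse)]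
    rw [List.reverse_append]
    rfl
  conv_rhs => rw [hdec]
  rw [pvF_ws_suffix _ (fun x hx => List.mem_takeWhile_imp (List.mem_reverse.mp hx))]
  rfl

theorem pvDropWhile_eq_self_head {p : Char → Bool} {c : Char} {l : List Char}
    (h : List.dropWhile p (c :: l) = c :: l) : p c = false := by
  by_cases hp : p c = true
  · rw [List.dropWhile_cons_of_pos hp] at h
    have := congrArg List.length h
    have hle := List.length_dropWhile_le p l
    simp at this
    omega
  · simpa using hp

theorem pvLstrip_strip (p : List Char) :
    List.dropWhile PySem.Chars.isspace (PySem.Chars.strip p) = PySem.Chars.strip p := by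
  rw [PySem.Chars.strip]
  cases hm : PySem.Chars.rstrip (PySem.Chars.lstrip p) with
  | nil => rfl
  | cons c t =>
    have hsuf : PySem.Chars.rstrip (PySem.Chars.lstrip p) <+: PySem.Chars.lstrip p := by
      rw [PySem.Chars.rstrip]
      have := List.dropWhile_suffix (l := (PySem.Chars.lstrip p).reverse) (PySem.Chars.isspace)
      have h2 := this.reverse
      simpa using h2
    rw [hm] at hsuf
    obtain ⟨u, hu⟩ := hsuf
    have hl : List.dropWhile PySem.Chars.isspace (PySem.Chars.lstrip p) = PySem.Chars.lstrip p := by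
      rw [PySem.Chars.lstrip]
      exact List.dropWhile_idempotent _ _
    rw [← hu, List.cons_append] at hl
    have hcfalse := pvDropWhile_eq_self_head hl
    rw [List.dropWhile_cons_of_neg (by simp [hcfalse])]

theorem pvRstrip_strip (p : List Char) :
    PySem.Chars.rstrip (PySem.Chars.strip p) = PySem.Chars.strip p := by
  rw [PySem.Chars.strip]
  simp [PySem.Chars.rstrip, List.reverse_reverse, List.dropWhile_idempotent]

theorem pvStrip_strip (p : List Char) :
    PySem.Chars.strip (PySem.Chars.strip p) = PySem.Chars.strip p := by
  conv_lhs => rw [PySem.Chars.strip, show PySem.Chars.lstrip (PySem.Chars.strip p)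
    = PySem.Chars.strip p from pvLstrip_strip p]
  exact pvRstrip_strip p

theorem pvSplit1_no_nl (t : List Char) (h : '\n' ∉ t) : pvSplit ['\n'] t = [t] := by
  induction t with
  | nil => rw [pvSplit]
  | cons c t' ih =>
    have hc : c ≠ '\n' := fun hc => h (by simp [hc])
    rw [pvSplit1_cons c t' hc, ih (fun hm => h (by simp [hm])), pvConsHead]

theorem pvNotAll_of_mem {l : List Char} {c : Char} (hc : c ∈ l)
    (hf : PySem.Chars.isspace c = false) : ¬ l.all PySem.Chars.isspace = true := by
  intro h
  rw [List.all_eq_true] at h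
  rw [h c hc] at hf
  exact Bool.noConfusion hf

def pvStep (p : List Char) : List (List Char) :=
  let t := PySem.Chars.strip p
  if t = [] then []
  else if (pvF t).length ≤ 1 then [t] else pvF t

theorem pvStep_eq (p : List Char) : pvStep p = pvF p := by
  show (if PySem.Chars.strip p = [] then []
    else if (pvF (PySem.Chars.strip p)).length ≤ 1 then [PySem.Chars.strip p]
    else pvF (PySem.Chars.strip p)) = pvF p
  rw [← pvF_strip p]
  set t := PySem.Chars.strip p with ht
  by_cases htn : t = []
  · rw [if_pos htn, htn, pvF_nil]
  · rw [if_neg htn]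
    have hlt : List.dropWhile PySem.Chars.isspace t = t := by rw [ht]; exact pvLstrip_strip p
    have hrt : PySem.Chars.rstrip t = t := by rw [ht]; exact pvRstrip_strip p
    obtain ⟨c0, tl, hct⟩ := List.exists_cons_of_ne_nil htn
    have hc0 : PySem.Chars.isspace c0 = false := pvDropWhile_eq_self_head (hct ▸ hlt)
    have hrev : List.dropWhile PySem.Chars.isspace t.reverse = t.reverse := by
      have h2 := congrArg List.reverse hrt
      rw [PySem.Chars.rstrip, List.reverse_reverse] at h2
      exact h2
    have hrevne : t.reverse ≠ [] := by simpa using htn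
    obtain ⟨cl, rl, hcl⟩ := List.exists_cons_of_ne_nil hrevne
    have hcle : PySem.Chars.isspace cl = false := pvDropWhile_eq_self_head (hcl ▸ hrev)
    have hnlspace : PySem.Chars.isspace '\n' = true := by decide
    by_cases hnl : '\n' ∈ t
    · -- at least two stripped non-empty lines: the `length ≤ 1` branch is off
      obtain ⟨a, b, hab⟩ := List.append_of_mem hnl
      have hFa : pvF a ≠ [] := by
        have han : a ≠ [] := by
          rintro rfl
          simp only [List.nil_append] at hab
          have h3 := List.cons_eq_cons.mp (hab.symm.trans hct)
          rw [← h3.1] at hc0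
          exact Bool.noConfusion (hnlspace.symm.trans hc0)
        obtain ⟨ca, ta, hcta⟩ := List.exists_cons_of_ne_nil han
        have hca : ca = c0 := by
          rw [hab, hcta] at hct
          exact (List.cons_eq_cons.mp hct.symm).1.symm
        rw [Ne, pvF_eq_nil_iff]
        exact pvNotAll_of_mem (by simp [hcta]) (hca ▸ hc0)
      have hFb : pvF b ≠ [] := by
        have hbn : b ≠ [] := by
          rintro rfl
          have h2 : t.reverse = '\n' :: a.reverse := by rw [hab]; simp
          have h3 := List.cons_eq_cons.mp (hcl.symm.trans h2)
          rw [h3.1] at hcle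
          exact Bool.noConfusion (hnlspace.symm.trans hcle)
        have hrbne : b.reverse ≠ [] := by simpa using hbn
        obtain ⟨cb, tb, hctb⟩ := List.exists_cons_of_ne_nil hrbne
        have hcb : cb = cl := by
          have h2 : t.reverse = cb :: (tb ++ '\n' :: a.reverse) := by
            rw [hab]; simp [hctb]
          exact (List.cons_eq_cons.mp (hcl.symm.trans h2)).1.symm
        rw [Ne, pvF_eq_nil_iff]
        exact pvNotAll_of_mem (List.mem_reverse.mp (by simp [hctb])) (hcb ▸ hcle)
      rw [hab, pvF_append]
      have h1 : 0 < (pvF a).length := List.length_pos_iff.mpr hFa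
      have h2 : 0 < (pvF b).length := List.length_pos_iff.mpr hFb
      rw [if_neg (by simp only [List.length_append]; omega)]
    · -- a single stripped line: it is t itself
      have hst : PySem.Chars.strip t = t := by rw [ht]; exact pvStrip_strip p
      have hFt : pvF t = [t] := by
        rw [pvF, pvSplit1_no_nl t hnl, List.filterMap_cons]
        rw [show pvG t = some t by rw [pvG, hst, if_neg htn]]
        rfl
      rw [hFt]
      simp

theorem pvSplitStr (s sep : String) (hs : sep.toList ≠ []) :
    (PySem.Str.split? s sep).getD [] = (pvSplit sep.toList s.toList).map String.ofList := by
  rw [PySem.Str.split?, PySem.Chars.split?, if_neg (by simpa [List.isEmpty_iff] using hs)]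
  rw [pvSplitOn_eq _ _ hs]
  rfl

theorem pvStrip_ofList (l : List Char) :
    PySem.Str.strip (String.ofList l) = String.ofList (PySem.Chars.strip l) := by
  rw [PySem.Str.strip, String.toList_ofList]

theorem pvOfList_eq_empty (l : List Char) : String.ofList l = "" ↔ l = [] := by
  rw [← String.toList_inj, String.toList_ofList]
  rfl

theorem pvLines (L : List (List Char)) :
    (L.map String.ofList).filterMap (fun line =>
        if PySem.Str.strip line = "" then none else some (PySem.Str.strip line))
      = (L.filterMap pvG).map String.ofList := by
  rw [List.filterMap_map, List.map_filterMap]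
  apply List.filterMap_congr
  intro l _
  show (if PySem.Str.strip (String.ofList l) = "" then none
      else some (PySem.Str.strip (String.ofList l))) = Option.map String.ofList (pvG l)
  rw [pvStrip_ofList, pvG]
  by_cases h : PySem.Chars.strip l = []
  · rw [if_pos ((pvOfList_eq_empty _).mpr h), if_pos h]
    rfl
  · rw [if_neg (fun hh => h ((pvOfList_eq_empty _).mp hh)), if_neg h]
    rfl

theorem pvMain (body : String) :
    extract_logical_blocks_py body = extract_logical_blocks_py_alt body := by
  have hB : extract_logical_blocks_py_alt body
      = (if ((pvF body.toList).map String.ofList : List String) = []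
          then [body] else (pvF body.toList).map String.ofList) := by
    rw [extract_logical_blocks_py_alt]
    rw [pvSplitStr body "\n" (by decide), show ("\n" : String).toList = ['\n'] from rfl, pvLines]
    rfl
  have hA : extract_logical_blocks_py body
      = (if ((pvF body.toList).map String.ofList : List String) = []
          then [body] else (pvF body.toList).map String.ofList) := by
    rw [extract_logical_blocks_py]
    rw [pvSplitStr body "\n\n" (by decide), show ("\n\n" : String).toList = ['\n', '\n'] from rfl]
    rw [List.foldl_map]
    rw [List.foldl_ext _ (fun bl pc => bl ++ (pvStep pc).map String.ofList) []
      (fun bl pc _ => by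
        show (let s := PySem.Str.strip (String.ofList pc);
          if s = "" then bl
          else
            let lines := ((PySem.Str.split? s "\n").getD []).filterMap (fun line =>
              if PySem.Str.strip line = "" then none else some (PySem.Str.strip line))
            if lines.length ≤ 1 then bl ++ [s] else bl ++ lines)
          = bl ++ (pvStep pc).map String.ofList
        rw [pvStrip_ofList, pvStep]
        show (if String.ofList (PySem.Chars.strip pc) = "" then bl
          else
            if (((PySem.Str.split? (String.ofList (PySem.Chars.strip pc)) "\n").getD []).filterMap
                (fun line => if PySem.Str.strip line = "" then none
                  else some (PySem.Str.strip line))).length ≤ 1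
            then bl ++ [String.ofList (PySem.Chars.strip pc)]
            else bl ++ ((PySem.Str.split? (String.ofList (PySem.Chars.strip pc)) "\n").getD []).filterMap
                (fun line => if PySem.Str.strip line = "" then none
                  else some (PySem.Str.strip line)))
          = bl ++ (let t := PySem.Chars.strip pc;
              if t = [] then [] else if (pvF t).length ≤ 1 then [t] else pvF t).map String.ofList
        by_cases h : PySem.Chars.strip pc = []
        · rw [if_pos ((pvOfList_eq_empty _).mpr h)]
          show bl = bl ++ (if PySem.Chars.strip pc = [] then []
            else if (pvF (PySem.Chars.strip pc)).length ≤ 1 then [PySem.Chars.strip pc]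
            else pvF (PySem.Chars.strip pc)).map String.ofList
          rw [if_pos h]
          simp
        · rw [if_neg (fun hh => h ((pvOfList_eq_empty _).mp hh))]
          rw [pvSplitStr _ "\n" (by decide), show ("\n" : String).toList = ['\n'] from rfl,
            String.toList_ofList, pvLines]
          show (if ((pvF (PySem.Chars.strip pc)).map String.ofList).length ≤ 1
              then bl ++ [String.ofList (PySem.Chars.strip pc)]
              else bl ++ (pvF (PySem.Chars.strip pc)).map String.ofList)
            = bl ++ (if PySem.Chars.strip pc = [] then []
              else if (pvF (PySem.Chars.strip pc)).length ≤ 1 then [PySem.Chars.strip pc]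
              else pvF (PySem.Chars.strip pc)).map String.ofList
          rw [if_neg h, List.length_map]
          by_cases hlen : (pvF (PySem.Chars.strip pc)).length ≤ 1
          · rw [if_pos hlen, if_pos hlen]
            rfl
          · rw [if_neg hlen, if_neg hlen])]
    rw [PySem.List.foldl_append_eq_flatMap]
    rw [List.flatMap_congr (fun pc _ => by rw [pvStep_eq])]
    rw [show (List.flatMap (fun pc => (pvF pc).map String.ofList)
        (pvSplit ['\n', '\n'] body.toList))
      = (List.flatMap pvF (pvSplit ['\n', '\n'] body.toList)).map String.ofList from
        (List.map_flatMap).symm]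
    rw [← pvF_flat]
    rfl
  rw [hA, hB]

-- ===== VERDICT (by name: the statement is the Claim_ definition above) =====
theorem extract_logical_blocks_py_spec : Claim_equal_extract_logical_blocks_py := by
  intro body _
  show extract_logical_blocks_py body = extract_logical_blocks_py_alt body
  exact pvMain body
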